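-- pv_equiv track=rewrite | github.com/Peefy/PeefyLeetCode | src/Python/longestCommonPrefix.py | is_same
-- ===== SOURCE A (Python) =====
-- def is_same(strs, index):
--     try:
--         count = 0
--         for i in range(len(strs) - 1):
--             if strs[i][index] == strs[i + 1][index]:
--                 count += 1
--         if count == len(strs) - 1:
--             return True
--         return False
--     except Exception as err:
--         return False
-- ===== SOURCE B (Python) =====
-- def is_same(strs, index):
--     try:
--         chars = {s[index] for s in strs}
--         return len(chars) == 1
--     except Exception:
--         return False
-- ===== Notes on version B (the rewrite author's own statement) =====
-- stated objective: simpler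
-- what changed: Replaces the adjacent-pair counter loop (count of matching neighbours compared to len-1) with a set comprehension of the characters at the index, deciding by whether the set has exactly one element.
-- outside the precondition, e.g. on is_same(['ab'], 5): A returns True, B returns False
import Mathlib
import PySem

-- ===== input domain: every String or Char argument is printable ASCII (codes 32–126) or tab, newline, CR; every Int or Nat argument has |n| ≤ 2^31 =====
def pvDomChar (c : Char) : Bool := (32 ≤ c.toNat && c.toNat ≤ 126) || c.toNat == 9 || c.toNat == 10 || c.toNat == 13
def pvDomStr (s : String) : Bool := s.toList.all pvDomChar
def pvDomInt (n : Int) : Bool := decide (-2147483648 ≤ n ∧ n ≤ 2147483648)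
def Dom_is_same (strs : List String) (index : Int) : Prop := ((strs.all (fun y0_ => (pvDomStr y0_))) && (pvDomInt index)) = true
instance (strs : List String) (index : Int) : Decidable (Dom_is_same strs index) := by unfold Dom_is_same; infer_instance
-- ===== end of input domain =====

-- B replaces A's adjacent-pair match counter with the set of characters at the index,
-- deciding by whether that set has exactly one element (objective: simpler).

-- ===== PORT A =====
-- one loop step: acc = none models the raised exception (caught as False below)
def pvStepA (strs : List String) (index : Int) (acc : Option Int) (i : Int) : Option Int :=
  match acc with
  | none => none
  | some count =>
    match (PySem.List.pyGet? strs i).bind (fun s => PySem.Str.pyGet? s index),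
          (PySem.List.pyGet? strs (i + 1)).bind (fun s => PySem.Str.pyGet? s index) with
    | some c1, some c2 => if c1 = c2 then some (count + 1) else some count
    | _, _ => none

def is_same (strs : List String) (index : Int) : Bool :=
  match (PySem.List.pyRange 0 ((strs.length : Int) - 1) 1).foldl (pvStepA strs index) (some 0) with
  | none => false                                   -- except: return False
  | some count => decide (count = (strs.length : Int) - 1)

-- ===== PORT B =====
def is_same_alt (strs : List String) (index : Int) : Bool :=
  match strs.mapM (fun s => PySem.Str.pyGet? s index) with   -- {s[index] for s in strs}; none = exception
  | none => false                                   -- except: return False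
  | some cs => decide ((PySem.Set.ofList cs).length = 1)     -- len(chars) == 1

-- ===== PRECONDITION & SPEC =====
-- Pre_ excludes the singleton list whose only string lacks the index: A's loop body never runs
-- so A returns True, while B's comprehension raises and returns False — both are defensible
-- readings of this unspecified corner.
def Pre_is_same (strs : List String) (index : Int) : Prop :=
  strs.length = 1 → (PySem.Str.pyGet? strs.headI index).isSome = true
instance (strs : List String) (index : Int) : Decidable (Pre_is_same strs index) := by
  unfold Pre_is_same; infer_instance

def pvWitness_is_same : List String × Int := (["ab", "ac"], 0)

def Spec_is_same (strs : List String) (index : Int) (out : Bool) : Prop := out = is_same_alt strs index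
instance (strs : List String) (index : Int) (out : Bool) : Decidable (Spec_is_same strs index out) := by unfold Spec_is_same; infer_instance

-- ===== CLAIM (what is proved, stated in full; the proofs are below) =====
def Claim_equal_is_same : Prop := ∀ (strs : List String) (index : Int), Dom_is_same strs index → Pre_is_same strs index → Spec_is_same strs index (is_same strs index)

-- ===== LEMMAS AND PROOFS =====

-- proof-side step over an adjacent pair of strings
def pvG (index : Int) (acc : Option Int) (p : String × String) : Option Int :=
  match acc with
  | none => none
  | some count =>
    match PySem.Str.pyGet? p.1 index, PySem.Str.pyGet? p.2 index with
    | some c1, some c2 => if c1 = c2 then some (count + 1) else some count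
    | _, _ => none

theorem pvG_none (index : Int) (l : List (String × String)) :
    l.foldl (pvG index) none = none := by
  induction l with
  | nil => rfl
  | cons p l ih => simpa [pvG] using ih

theorem pvG_fst_none (index : Int) (count : Int) (p : String × String)
    (h1 : PySem.Str.pyGet? p.1 index = none) : pvG index (some count) p = none := by
  unfold pvG; rw [h1]

theorem pvG_snd_none (index : Int) (count : Int) (p : String × String)
    (h2 : PySem.Str.pyGet? p.2 index = none) : pvG index (some count) p = none := by
  unfold pvG; cases h1 : PySem.Str.pyGet? p.1 index <;> rw [h2]

theorem pvG_some_some (index : Int) (count : Int) (p : String × String) (c1 c2 : Char)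
    (h1 : PySem.Str.pyGet? p.1 index = some c1) (h2 : PySem.Str.pyGet? p.2 index = some c2) :
    pvG index (some count) p = if c1 = c2 then some (count + 1) else some count := by
  unfold pvG; rw [h1, h2]

theorem pvG_step_le (index : Int) (acc acc' : Int) (p : String × String)
    (h : pvG index (some acc) p = some acc') : acc' ≤ acc + 1 := by
  rcases h1 : PySem.Str.pyGet? p.1 index with _ | c1
  · rw [pvG_fst_none index acc p h1] at h; exact absurd h (by simp)
  · rcases h2 : PySem.Str.pyGet? p.2 index with _ | c2
    · rw [pvG_snd_none index acc p h2] at h; exact absurd h (by simp)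
    · rw [pvG_some_some index acc p c1 c2 h1 h2] at h
      split at h <;> simp at h <;> omega

theorem pvG_bound (index : Int) (l : List (String × String)) :
    ∀ (acc count : Int), l.foldl (pvG index) (some acc) = some count →
      count ≤ acc + l.length := by
  induction l with
  | nil => intro acc count h; simp at h; omega
  | cons p l ih =>
    intro acc count h
    simp only [List.foldl_cons] at h
    rcases hstep : pvG index (some acc) p with _ | acc'
    · rw [hstep, pvG_none] at h; exact absurd h (by simp)
    · rw [hstep] at h
      have h1 := pvG_step_le index acc acc' p hstep
      have h2 := ih acc' count h
      simp; omega

theorem pv_zip_eq_map_range (l : List String) :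
    l.zip l.tail = (List.range (l.length - 1)).map
      (fun k => (l.getD k "", l.getD (k + 1) "")) := by
  apply List.ext_getElem
  · simp [List.length_zip]
  · intro k h1 h2
    have hk : k < l.length - 1 := by simpa using h2
    have hk1 : k + 1 < l.length := by omega
    rw [List.getElem_zip, List.getElem_map, List.getElem_range,
        List.getD_eq_getElem _ _ (by omega : k < l.length),
        List.getD_eq_getElem _ _ hk1, List.getElem_tail]

-- the range fold of A equals the fold over adjacent pairs
theorem pv_bridge (strs : List String) (index : Int) (acc : Option Int) :
    (PySem.List.pyRange 0 ((strs.length : Int) - 1) 1).foldl (pvStepA strs index) acc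
      = (strs.zip strs.tail).foldl (pvG index) acc := by
  rcases strs with _ | ⟨a, rest⟩
  · simp [PySem.List.pyRange_one_eq_nil]
  rw [PySem.List.pyRange_one]
  have hlen : (((a :: rest).length : Int) - 1 - 0).toNat = (a :: rest).length - 1 := by
    simp
  rw [hlen, pv_zip_eq_map_range, List.foldl_map, List.foldl_map]
  apply PySem.List.foldl_congr_mem
  intro b k hk
  have hk' : k < (a :: rest).length - 1 := List.mem_range.mp hk
  have h1 : 0 + (k : Int) = ((k : Nat) : Int) := by omega
  unfold pvStepA pvG
  have e1 : PySem.List.pyGet? (a :: rest) ((k : Nat) : Int) = some ((a :: rest).getD k "") := by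
    rw [PySem.List.pyGet?_natCast, List.getD_eq_getElem _ _ (by omega),
        List.getElem?_eq_getElem (by omega)]
  have e2 : PySem.List.pyGet? (a :: rest) (((k : Nat) : Int) + 1) = some ((a :: rest).getD (k + 1) "") := by
    have : ((k : Nat) : Int) + 1 = ((k + 1 : Nat) : Int) := by omega
    rw [this, PySem.List.pyGet?_natCast, List.getD_eq_getElem _ _ (by omega),
        List.getElem?_eq_getElem (by omega)]
  rw [h1, e1, e2]
  simp

-- core invariant: the pair fold's "all pairs matched" test equals "every later char equals c"
theorem pv_core (index : Int) :
    ∀ (rest : List String) (a : String) (c : Char) (acc t : Int),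
      PySem.Str.pyGet? a index = some c → t = acc + rest.length →
      (match ((a :: rest).zip rest).foldl (pvG index) (some acc) with
       | none => false
       | some count => decide (count = t))
      = (match rest.mapM (fun s => PySem.Str.pyGet? s index) with
         | none => false
         | some cs => decide (∀ x ∈ cs, x = c)) := by
  intro rest
  induction rest with
  | nil => intro a c acc t ha ht; simp [ht]
  | cons b rest ih =>
    intro a c acc t ha ht
    have hz : ((a :: b :: rest).zip (b :: rest)) = (a, b) :: ((b :: rest).zip rest) := rfl
    rw [hz, List.foldl_cons]
    rcases hb : PySem.Str.pyGet? b index with _ | cb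
    · rw [pvG_snd_none index acc (a, b) hb, pvG_none]
      simp [List.mapM_cons, show PySem.List.pyGet? b.toList index = none from hb]
    · rw [pvG_some_some index acc (a, b) c cb ha hb]
      have hb' : PySem.List.pyGet? b.toList index = some cb := hb
      by_cases hcb : c = cb
      · subst hcb
        rw [if_pos rfl]
        rw [ih b c (acc + 1) t hb (by simp at ht ⊢; omega)]
        rcases hm : List.mapM (fun s => PySem.List.pyGet? s.toList index) rest with _ | cs
        · simp [List.mapM_cons, hm, hb']
        · simp [List.mapM_cons, hm, hb']
      · rw [if_neg hcb]
        have hfalse : (match ((b :: rest).zip rest).foldl (pvG index) (some acc) with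
            | none => false
            | some count => decide (count = t)) = false := by
          rcases hf : ((b :: rest).zip rest).foldl (pvG index) (some acc) with _ | count
          · rfl
          · have hb2 := pvG_bound index _ _ _ hf
            have hlen : ((b :: rest).zip rest).length = rest.length := by
              simp [List.length_zip]
            rw [hlen] at hb2
            simp only [decide_eq_false_iff_not]
            simp at ht; omega
        rw [hfalse]
        rcases hm : List.mapM (fun s => PySem.List.pyGet? s.toList index) rest with _ | cs
        · simp [List.mapM_cons, hm, hb']
        · simp [List.mapM_cons, hm, hb']
          exact fun h => absurd h.symm hcb

-- PySem.Set: length increases along foldl add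
theorem pv_len_mono (cs : List Char) : ∀ (s : PySem.Set Char),
    s.length ≤ (cs.foldl PySem.Set.add s).length := by
  induction cs with
  | nil => intro s; simp
  | cons x cs ih =>
    intro s
    refine le_trans ?_ (ih (PySem.Set.add s x))
    unfold PySem.Set.add
    split <;> simp

theorem pv_foldl_add_of_all (c : Char) (cs : List Char) (h : ∀ x ∈ cs, x = c) :
    cs.foldl PySem.Set.add [c] = [c] := by
  induction cs with
  | nil => rfl
  | cons y cs ih =>
    have hy : y = c := h y (by simp)
    subst hy
    have hadd : PySem.Set.add [y] y = [y] := by simp [PySem.Set.add, PySem.Set.contains]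
    rw [List.foldl_cons, hadd]
    exact ih (fun x hx => h x (by simp [hx]))

theorem pv_set_bad (cs : List Char) : ∀ (c : Char), (∃ x ∈ cs, x ≠ c) →
    2 ≤ (cs.foldl PySem.Set.add [c]).length := by
  induction cs with
  | nil => intro c h; simp at h
  | cons y cs ih =>
    intro c h
    by_cases hy : y = c
    · have hadd : PySem.Set.add [c] y = [c] := by simp [PySem.Set.add, PySem.Set.contains, hy]
      rw [List.foldl_cons, hadd]
      apply ih
      rcases h with ⟨x, hx, hne⟩
      rcases List.mem_cons.mp hx with h1 | h1
      · exact absurd (h1.trans hy) hne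
      · exact ⟨x, h1, hne⟩
    · have hadd : PySem.Set.add [c] y = [c, y] := by
        simp [PySem.Set.add, PySem.Set.contains, hy]
      rw [List.foldl_cons, hadd]
      have := pv_len_mono cs [c, y]
      simpa using this

theorem pv_set_singleton (c : Char) (cs : List Char) :
    ((PySem.Set.ofList (c :: cs)).length = 1) ↔ (∀ x ∈ cs, x = c) := by
  rw [PySem.Set.ofList_eq_foldl, List.foldl_cons]
  have hadd : PySem.Set.add ([] : PySem.Set Char) c = [c] := by rfl
  rw [hadd]
  constructor
  · intro h
    by_contra hbad
    push Not at hbad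
    have := pv_set_bad cs c hbad
    omega
  · intro h
    rw [pv_foldl_add_of_all c cs h]
    rfl

-- ===== VERDICT (by name: the statement is the Claim_ definition above) =====
theorem is_same_spec : Claim_equal_is_same := by
  intro strs index _ hpre
  unfold Spec_is_same is_same is_same_alt
  rw [pv_bridge]
  rcases strs with _ | ⟨a, rest⟩
  · simp
  simp only [List.tail_cons]
  rcases ha : PySem.Str.pyGet? a index with _ | c
  · -- first char invalid: both sides False (Pre_ rules out the singleton case)
    rcases rest with _ | ⟨b, rest⟩
    · exact absurd (hpre rfl)
        (by simp [show PySem.List.pyGet? a.toList index = none from ha])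
    · have hz : ((a :: b :: rest).zip (b :: rest)) = (a, b) :: ((b :: rest).zip rest) := rfl
      rw [hz, List.foldl_cons, pvG_fst_none index 0 (a, b) ha, pvG_none]
      simp [List.mapM_cons, show PySem.List.pyGet? a.toList index = none from ha]
  · rw [pv_core index rest a c 0 _ ha (by simp)]
    have ha' : PySem.List.pyGet? a.toList index = some c := ha
    rcases hm : List.mapM (fun s => PySem.List.pyGet? s.toList index) rest with _ | cs
    · simp [List.mapM_cons, ha', hm]
    · have hm' : List.mapM (fun s => PySem.Str.pyGet? s index) rest = some cs := hm
      rw [List.mapM_cons, ha, hm']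
      simp [pv_set_singleton]
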